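-- pv_equiv track=rewrite | github.com/daihuaiii/SuM_ICD | scripts/metrics.py | TN_score_cal
-- ===== SOURCE A (Python) =====
-- def TN_score_cal(predict_i, result, k, TN, res_list):
--     res = predict_i[:k]
--     for j in res_list:
--         if j != result:
--             if j not in res:
--                 num_tn = TN.get(j, 0)
--                 num_tn += 1
--                 TN[j] = num_tn
--
--     return TN
-- ===== SOURCE B (Python) =====
-- def TN_score_cal(predict_i, result, k, TN, res_list):
--     # Returns the updated dict; unlike A it does not mutate TN in place.
--     res = predict_i[:k]
--     hits = [j for j in res_list if j != result and j not in res]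
--     counts = {}
--     for j in hits:
--         counts[j] = counts.get(j, 0) + 1
--     out = {key: val + counts.get(key, 0) for key, val in TN.items()}
--     for j, c in counts.items():
--         if j not in TN:
--             out[j] = c
--     return out
-- ===== Notes on version B (the rewrite author's own statement) =====
-- stated objective: alternative
-- what changed: B never folds per-occurrence increments into TN: it filters res_list once into the qualifying hits, tallies them into a counts dict, rebuilds the existing TN items with a map that adds each key's count, and appends the fresh counted keys (first-appearance order).
import Mathlib
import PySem

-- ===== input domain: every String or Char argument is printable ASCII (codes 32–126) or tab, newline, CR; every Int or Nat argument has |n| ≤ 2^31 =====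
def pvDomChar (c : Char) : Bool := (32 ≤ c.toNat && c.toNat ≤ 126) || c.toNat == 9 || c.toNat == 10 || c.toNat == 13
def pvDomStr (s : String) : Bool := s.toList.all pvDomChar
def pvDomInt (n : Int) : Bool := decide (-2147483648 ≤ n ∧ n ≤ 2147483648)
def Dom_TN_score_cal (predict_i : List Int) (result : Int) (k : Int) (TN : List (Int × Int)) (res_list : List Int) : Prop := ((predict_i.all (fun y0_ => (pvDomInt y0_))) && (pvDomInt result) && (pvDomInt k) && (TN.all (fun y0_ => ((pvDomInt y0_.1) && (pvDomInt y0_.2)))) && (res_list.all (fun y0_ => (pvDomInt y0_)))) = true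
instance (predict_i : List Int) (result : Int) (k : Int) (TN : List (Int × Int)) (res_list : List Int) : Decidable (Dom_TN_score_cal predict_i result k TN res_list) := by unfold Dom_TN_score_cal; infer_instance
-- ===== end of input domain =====

-- ===== PORT A =====
-- B rebuilds the result functionally (filter once, map existing items adding counts, append
-- fresh keys with counts) instead of A's per-occurrence increment loop into the dict; Python A
-- mutates TN in place, B returns a fresh dict — the equivalence is about the returned value.
def TN_score_cal (predict_i : List Int) (result : Int) (k : Int) (TN : List (Int × Int)) (res_list : List Int) : List (Int × Int) :=
  let res := PySem.List.slice predict_i none (some k)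
  (res_list.foldl (fun TNd j =>
      if j ≠ result then
        if j ∉ res then
          let num_tn := TNd.getD j 0
          let num_tn := num_tn + 1
          TNd.insert j num_tn
        else TNd
      else TNd) (PySem.Dict.ofList TN)).items

-- ===== PORT B =====
def TN_score_cal_alt (predict_i : List Int) (result : Int) (k : Int) (TN : List (Int × Int)) (res_list : List Int) : List (Int × Int) :=
  let res := PySem.List.slice predict_i none (some k)
  let hits := res_list.filter (fun j => decide (j ≠ result ∧ j ∉ res))
  let counts := hits.foldl (fun c j => c.insert j (c.getD j 0 + 1)) PySem.Dict.empty
  let d0 := PySem.Dict.ofList TN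
  let old := d0.items.map (fun p => (p.1, p.2 + counts.getD p.1 0))
  let fresh := counts.items.filter (fun p => !(d0.contains p.1))
  old ++ fresh

-- ===== PRECONDITION & SPEC =====
def Spec_TN_score_cal (predict_i : List Int) (result : Int) (k : Int) (TN : List (Int × Int)) (res_list : List Int) (out : List (Int × Int)) : Prop := out = TN_score_cal_alt predict_i result k TN res_list
instance (predict_i : List Int) (result : Int) (k : Int) (TN : List (Int × Int)) (res_list : List Int) (out : List (Int × Int)) : Decidable (Spec_TN_score_cal predict_i result k TN res_list out) := by unfold Spec_TN_score_cal; infer_instance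

-- ===== CLAIM =====
def Claim_equal_TN_score_cal : Prop := ∀ (predict_i : List Int) (result : Int) (k : Int) (TN : List (Int × Int)) (res_list : List Int), Dom_TN_score_cal predict_i result k TN res_list → Spec_TN_score_cal predict_i result k TN res_list (TN_score_cal predict_i result k TN res_list)

-- ===== LEMMAS AND PROOFS =====

-- A's conditional per-element loop equals the unconditional increment loop over the filtered list.
theorem pv_foldA_filter (result : Int) (res : List Int) :
    ∀ (l : List Int) (d : PySem.Dict Int Int),
      l.foldl (fun TNd j =>
        if j ≠ result then
          if j ∉ res then TNd.insert j (TNd.getD j 0 + 1) else TNd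
        else TNd) d
      = (l.filter (fun j => decide (j ≠ result ∧ j ∉ res))).foldl
          (fun TNd j => TNd.insert j (TNd.getD j 0 + 1)) d := by
  intro l
  induction l with
  | nil => intro d; rfl
  | cons x t ih =>
      intro d
      simp only [List.foldl_cons, List.filter_cons]
      by_cases h1 : x ≠ result
      · by_cases h2 : x ∉ res
        · rw [if_pos h1, if_pos h2, if_pos (by simpa using And.intro h1 h2), List.foldl_cons]
          exact ih _
        · rw [if_pos h1, if_neg h2, if_neg (by simp [h2])]
          exact ih _
      · rw [if_neg h1, if_neg (by simp [h1])]
        exact ih _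

-- Dict.contains agrees with Set.contains on the key list.
theorem pv_contains_keys (d : PySem.Dict Int Int) (j : Int) :
    PySem.Set.contains d.keys j = d.contains j := by
  simp [PySem.Set.contains_eq_listContains, PySem.Dict.contains_eq_decide_mem_keys]

-- The central equality: the increment loop's items = mapped old items ++ fresh keys with counts.
theorem pv_main (TN : List (Int × Int)) (hits : List Int) :
    (hits.foldl (fun TNd j => TNd.insert j (TNd.getD j 0 + 1)) (PySem.Dict.ofList TN)).items
    = (PySem.Dict.ofList TN).items.map
        (fun p => (p.1, p.2 + (PySem.Dict.counter hits).getD p.1 0))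
      ++ ((PySem.Dict.counter hits).items.filter
            (fun p => !((PySem.Dict.ofList TN).contains p.1))) := by
  simp only [PySem.Dict.getD_counter, PySem.Dict.items_counter, List.filter_map,
    Function.comp_def]
  set d0 := PySem.Dict.ofList TN with hd0
  have hnd0 : d0.keys.Nodup := PySem.Dict.nodup_keys_ofList TN
  set D1 := hits.foldl (fun TNd j => TNd.insert j (TNd.getD j 0 + 1)) d0 with hD1
  have hn1 : D1.keys.Nodup := PySem.Dict.nodup_keys_foldl_insert _ _ _ hnd0
  have hk1 : D1.keys = d0.keys ++ (PySem.Set.ofList hits).filter (fun j => !(d0.contains j)) := by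
    rw [hD1, PySem.Dict.keys_foldl_insert, PySem.Set.update_eq_append_filter]
    congr 1
    exact List.filter_congr (fun j _ => by rw [pv_contains_keys])
  have hg : ∀ v : Int, D1.getD v 0 = d0.getD v 0 + (hits.count v : Int) :=
    fun v => PySem.Dict.getD_foldl_insert_add_one ..
  rw [PySem.Dict.items_eq_map_keys D1 hn1 0, hk1, List.map_append]
  congr 1
  · rw [PySem.Dict.items_eq_map_keys d0 hnd0 0, List.map_map]
    exact List.map_congr_left (fun j _ => by simp [hg j])
  · refine List.map_congr_left (fun j hj => ?_)
    have hnc : d0.contains j = false := by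
      have := (List.mem_filter.mp hj).2
      simpa using this
    simp [hg j, PySem.Dict.getD_of_not_contains, hnc]

-- ===== VERDICT =====
theorem TN_score_cal_spec : Claim_equal_TN_score_cal := by
  intro predict_i result k TN res_list _
  unfold Spec_TN_score_cal TN_score_cal TN_score_cal_alt
  simp only []
  rw [pv_foldA_filter, PySem.Dict.foldl_insert_getD_add_one_eq_counter]
  exact pv_main TN _
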